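-- pv_equiv track=rewrite | github.com/antsalan/xmlconvertor | xml_to_excel.py | cartesian_product_rows
-- ===== SOURCE A (Python) =====
-- from collections import OrderedDict
-- from typing import List, Dict, Any, Iterator, Tuple, Optional
--
-- def cartesian_product_rows(row_groups: List[List[Dict[str, Any]]]) -> List[Dict[str, Any]]:
--     """
--     Compute the Cartesian product of multiple row groups.
--
--     Args:
--         row_groups: List of row group lists to combine
--
--     Returns:
--         List of combined row dictionaries
--     """
--     if not row_groups:
--         return [OrderedDict()]
--
--     if len(row_groups) == 1:
--         return row_groups[0]
--
--     result = row_groups[0]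
--     for next_group in row_groups[1:]:
--         new_result = []
--         for existing_row in result:
--             for new_row in next_group:
--                 combined = OrderedDict(existing_row)
--                 combined.update(new_row)
--                 new_result.append(combined)
--         result = new_result
--
--     return result if result else [OrderedDict()]
-- ===== SOURCE B (Python) =====
-- from collections import OrderedDict
-- from itertools import product
-- from typing import List, Dict, Any
--
--
-- def cartesian_product_rows(row_groups: List[List[Dict[str, Any]]]) -> List[Dict[str, Any]]:
--     if not row_groups:
--         return [OrderedDict()]
--     if len(row_groups) == 1:
--         return row_groups[0]
--     result = []
--     for combo in product(*row_groups):
--         merged = OrderedDict()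
--         for row in combo:
--             merged.update(row)
--         result.append(merged)
--     return result if result else [OrderedDict()]
-- ===== Notes on version B (the rewrite author's own statement) =====
-- stated objective: idiomatic
-- what changed: Replaces the incremental pairwise fold that rebuilds and copies partial result rows at every stage with a single pass over itertools.product of all groups, merging each combination once into a fresh OrderedDict.
import Mathlib
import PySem

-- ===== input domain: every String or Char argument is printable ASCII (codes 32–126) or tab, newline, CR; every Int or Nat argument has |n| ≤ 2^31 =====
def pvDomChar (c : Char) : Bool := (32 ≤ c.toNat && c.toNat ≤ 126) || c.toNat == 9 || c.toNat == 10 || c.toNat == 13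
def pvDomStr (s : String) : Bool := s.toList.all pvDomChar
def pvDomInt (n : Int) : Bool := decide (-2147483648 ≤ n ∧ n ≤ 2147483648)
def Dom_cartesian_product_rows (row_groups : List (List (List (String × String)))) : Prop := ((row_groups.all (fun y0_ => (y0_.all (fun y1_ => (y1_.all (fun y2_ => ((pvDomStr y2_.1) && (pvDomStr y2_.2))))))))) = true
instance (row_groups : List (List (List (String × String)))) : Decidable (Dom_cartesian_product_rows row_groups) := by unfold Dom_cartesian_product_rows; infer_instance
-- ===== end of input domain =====

-- B replaces A's stage-by-stage fold over the tail groups with one pass over the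
-- full Cartesian product of all groups, merging each combination once (idiomatic).

-- ===== PORT A =====
-- combined = OrderedDict(existing_row); combined.update(new_row)
def pvMergeA (e r : List (String × String)) : List (String × String) :=
  ((PySem.Dict.ofList e).update r).items

def cartesian_product_rows (row_groups : List (List (List (String × String)))) : List (List (String × String)) :=
  match row_groups with
  | [] => [[]]
  | [g] => g
  | g0 :: rest =>
      -- result = row_groups[0]; for next_group in row_groups[1:]: nested loops appending combined rows
      let res := rest.foldl (fun result next_group =>
        result.foldl (fun acc e =>
          next_group.foldl (fun acc r => acc ++ [pvMergeA e r]) acc) []) g0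
      if res.isEmpty then [[]] else res

-- ===== PORT B =====
-- itertools.product(*row_groups): tuples in lexicographic order, rightmost group fastest
def pvProduct {α : Type} : List (List α) → List (List α)
  | [] => [[]]
  | g :: gs => g.flatMap (fun r => (pvProduct gs).map (fun c => r :: c))

-- merged = OrderedDict(); for row in combo: merged.update(row)
def pvMergeB (combo : List (List (String × String))) : List (String × String) :=
  (combo.foldl (fun d row => d.update row) PySem.Dict.empty).items

def cartesian_product_rows_alt (row_groups : List (List (List (String × String)))) : List (List (String × String)) :=
  match row_groups with
  | [] => [[]]
  | [g] => g
  | g0 :: g1 :: rest =>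
      let res := (pvProduct (g0 :: g1 :: rest)).map pvMergeB
      if res.isEmpty then [[]] else res

-- ===== PRECONDITION & SPEC =====
def Spec_cartesian_product_rows (row_groups : List (List (List (String × String)))) (out : List (List (String × String))) : Prop := out = cartesian_product_rows_alt row_groups
instance (row_groups : List (List (List (String × String)))) (out : List (List (String × String))) : Decidable (Spec_cartesian_product_rows row_groups out) := by unfold Spec_cartesian_product_rows; infer_instance

-- ===== CLAIM (what is proved, stated in full; the proofs are below) =====
def Claim_equal_cartesian_product_rows : Prop := ∀ (row_groups : List (List (List (String × String)))), Dom_cartesian_product_rows row_groups → Spec_cartesian_product_rows row_groups (cartesian_product_rows row_groups)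

-- ===== LEMMAS AND PROOFS =====

theorem pvDict_update_append (d : PySem.Dict String String) (xs ys : List (String × String)) :
    d.update (xs ++ ys) = (d.update xs).update ys := by
  simp [PySem.Dict.update, List.foldl_append]

-- building a dict from the items of a nodup-keyed dict gives it back
theorem pvOfList_items (d : PySem.Dict String String) (hd : d.keys.Nodup) :
    PySem.Dict.ofList d.items = d := by
  apply PySem.Dict.ext
  show (PySem.Dict.empty.update d.items).items = d.items
  have h := PySem.Dict.items_foldl_insert_fresh (κ := String) (ν := String)
      d.items Prod.fst Prod.snd PySem.Dict.empty
      (fun a _ => PySem.Dict.contains_empty a.1) hd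
  simpa [PySem.Dict.update, PySem.Dict.empty] using h

-- one inner double loop of A equals a flatMap/map pass
theorem pvStepA_eq (g : List (List (String × String))) :
    ∀ (R : List (List (String × String))) (acc : List (List (String × String))),
      R.foldl (fun acc e => g.foldl (fun a r => a ++ [pvMergeA e r]) acc) acc
        = acc ++ R.flatMap (fun e => g.map (pvMergeA e)) := by
  intro R
  induction R with
  | nil => simp
  | cons e R ih =>
      intro acc
      simp only [List.foldl_cons, List.flatMap_cons]
      rw [ih, PySem.List.foldl_append_singleton_eq_map, List.append_assoc]

-- A's whole fold over the tail groups = map of the merged product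
theorem pvFoldA_eq (gs : List (List (List (String × String)))) :
    ∀ (g : List (List (String × String))) (R : List (List (String × String))),
      (g :: gs).foldl (fun result next_group =>
          result.foldl (fun acc e =>
            next_group.foldl (fun acc r => acc ++ [pvMergeA e r]) acc) []) R
        = R.flatMap (fun e =>
            (pvProduct (g :: gs)).map (fun c => ((PySem.Dict.ofList e).update c.flatten).items)) := by
  induction gs with
  | nil =>
      intro g R
      rw [List.foldl_cons, List.foldl_nil, pvStepA_eq g R []]
      simp [pvProduct, ← List.map_eq_flatMap, Function.comp_def]
      rfl
  | cons g' gs ih =>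
      intro g R
      rw [List.foldl_cons, pvStepA_eq g R [], List.nil_append, ih g']
      rw [List.flatMap_assoc]
      congr 1; funext e
      rw [List.flatMap_map]
      show (g.flatMap fun r =>
          (pvProduct (g' :: gs)).map (fun c => ((PySem.Dict.ofList (pvMergeA e r)).update c.flatten).items))
        = (pvProduct (g :: g' :: gs)).map (fun c => ((PySem.Dict.ofList e).update c.flatten).items)
      rw [show pvProduct (g :: g' :: gs) = g.flatMap (fun r => (pvProduct (g' :: gs)).map (fun c => r :: c)) from rfl]
      rw [List.map_flatMap]
      congr 1; funext r
      rw [List.map_map]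
      congr 1; funext c
      show ((PySem.Dict.ofList (pvMergeA e r)).update c.flatten).items
          = ((PySem.Dict.ofList e).update (r :: c).flatten).items
      rw [pvMergeA, pvOfList_items _ (PySem.Dict.nodup_keys_update _ _ (PySem.Dict.nodup_keys_ofList e))]
      rw [List.flatten_cons, pvDict_update_append]

-- B's merge of a combination, in closed form
theorem pvMergeB_eq (combo : List (List (String × String))) :
    ∀ (d : PySem.Dict String String),
      combo.foldl (fun d row => d.update row) d = d.update combo.flatten := by
  induction combo with
  | nil => intro d; simp [PySem.Dict.update]
  | cons r combo ih =>
      intro d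
      rw [List.foldl_cons, ih, List.flatten_cons, pvDict_update_append]

-- ===== VERDICT (by name: the statement is the Claim_ definition above) =====
theorem cartesian_product_rows_spec : Claim_equal_cartesian_product_rows := by
  intro row_groups _
  unfold Spec_cartesian_product_rows
  match row_groups with
  | [] => rfl
  | [g] => rfl
  | g0 :: g1 :: rest =>
      have hA := pvFoldA_eq rest g1 g0
      have hE : (g0.flatMap fun e =>
            (pvProduct (g1 :: rest)).map (fun c => ((PySem.Dict.ofList e).update c.flatten).items))
          = (pvProduct (g0 :: g1 :: rest)).map pvMergeB := by
        rw [show pvProduct (g0 :: g1 :: rest)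
              = g0.flatMap (fun r => (pvProduct (g1 :: rest)).map (fun c => r :: c)) from rfl]
        rw [List.map_flatMap]
        congr 1; funext e
        rw [List.map_map]
        congr 1; funext c
        show ((PySem.Dict.ofList e).update c.flatten).items = pvMergeB (e :: c)
        rw [pvMergeB, pvMergeB_eq (e :: c) PySem.Dict.empty, List.flatten_cons, pvDict_update_append]
        rfl
      show cartesian_product_rows (g0 :: g1 :: rest) = cartesian_product_rows_alt (g0 :: g1 :: rest)
      unfold cartesian_product_rows cartesian_product_rows_alt
      simp only [hA, hE]
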